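-- pv_equiv track=rewrite | github.com/mgn00034/Multiagentes_comunidad | config/configuracion.py | _repartir_uniformemente
-- ===== SOURCE A (Python) =====
-- def _repartir_uniformemente(
--     total: int,
--     niveles: list[int],
-- ) -> list[tuple[int, int]]:
--     """Reparte ``total`` jugadores uniformemente entre los niveles dados.
--
--     Si la división no es exacta, los primeros niveles de la lista
--     reciben un jugador extra hasta agotar el resto.
--
--     Args:
--         total: Número total de jugadores a repartir.
--         niveles: Lista de niveles de estrategia entre los que repartir.
--
--     Returns:
--         Lista de tuplas ``(nivel, cantidad)`` que indica cuántos
--         jugadores se generan para cada nivel.  Mantiene el orden de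
--         ``niveles`` para que el resultado sea reproducible.
--     """
--     distribucion: list[tuple[int, int]] = []
--
--     if not niveles or total <= 0:
--         return distribucion
--
--     base = total // len(niveles)
--     resto = total % len(niveles)
--
--     for posicion, nivel in enumerate(niveles):
--         cantidad = base + (1 if posicion < resto else 0)
--         if cantidad > 0:
--             distribucion.append((nivel, cantidad))
--
--     return distribucion
-- ===== SOURCE B (Python) =====
-- def _repartir_uniformemente(
--     total: int,
--     niveles: list[int],
-- ) -> list[tuple[int, int]]:
--     """Greedy running-remainder split: each level in turn takes the ceiling
--     of (players still to place) / (levels still to serve), stopping early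
--     once nothing remains."""
--     distribucion: list[tuple[int, int]] = []
--     restante = total
--     pendientes = len(niveles)
--     for nivel in niveles:
--         if restante <= 0:
--             break
--         cantidad = -(-restante // pendientes)  # ceil division
--         distribucion.append((nivel, cantidad))
--         restante -= cantidad
--         pendientes -= 1
--     return distribucion
-- ===== Notes on version B (the rewrite author's own statement) =====
-- stated objective: alternative
-- what changed: Replaces A's precomputed base/remainder quotients plus positivity filter by a greedy running-remainder loop: each level takes ceil(restante/pendientes) of the players still unplaced, the remainder shrinks as it goes, and the loop breaks early when nothing is left, so no enumerate, no modulus and no filter remain.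
import Mathlib
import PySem

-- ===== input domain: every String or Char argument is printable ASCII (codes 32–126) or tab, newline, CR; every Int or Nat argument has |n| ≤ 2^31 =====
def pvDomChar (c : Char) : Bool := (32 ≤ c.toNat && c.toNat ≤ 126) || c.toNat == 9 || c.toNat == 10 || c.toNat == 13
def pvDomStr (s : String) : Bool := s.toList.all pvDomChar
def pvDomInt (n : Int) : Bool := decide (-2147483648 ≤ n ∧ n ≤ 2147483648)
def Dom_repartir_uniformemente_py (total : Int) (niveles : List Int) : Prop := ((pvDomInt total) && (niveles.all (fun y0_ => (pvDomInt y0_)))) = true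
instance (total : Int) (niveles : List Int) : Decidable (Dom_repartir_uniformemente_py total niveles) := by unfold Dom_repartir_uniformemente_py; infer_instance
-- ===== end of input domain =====

-- B replaces A's base/remainder arithmetic and positivity filter with a greedy
-- running-remainder loop (ceil(restante/pendientes) per level, early break);
-- an alternative decomposition of the same O(n) task.

-- ===== PORT A =====
def repartir_uniformemente_py (total : Int) (niveles : List Int) : List (Int × Int) :=
  if niveles = [] ∨ total ≤ 0 then []
  else
    let n : Int := (niveles.length : Int)
    let base := PySem.Int.floordiv total n
    let resto := PySem.Int.mod total n
    (PySem.List.enumerate niveles).foldl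
      (fun acc p =>
        let cantidad := base + (if p.1 < resto then (1 : Int) else 0)
        if cantidad > 0 then acc ++ [(p.2, cantidad)] else acc) []

-- ===== PORT B =====
-- helper: the body of Source B's for-loop with break, as structural recursion on the list
def pvAltGo (restante pendientes : Int) : List Int → List (Int × Int)
  | [] => []
  | nivel :: rest =>
    if restante ≤ 0 then []
    else
      let cantidad := -(PySem.Int.floordiv (-restante) pendientes)
      (nivel, cantidad) :: pvAltGo (restante - cantidad) (pendientes - 1) rest

def repartir_uniformemente_py_alt (total : Int) (niveles : List Int) : List (Int × Int) :=
  pvAltGo total (niveles.length : Int) niveles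

-- ===== PRECONDITION & SPEC =====
def Spec_repartir_uniformemente_py (total : Int) (niveles : List Int) (out : List (Int × Int)) : Prop := out = repartir_uniformemente_py_alt total niveles
instance (total : Int) (niveles : List Int) (out : List (Int × Int)) : Decidable (Spec_repartir_uniformemente_py total niveles out) := by unfold Spec_repartir_uniformemente_py; infer_instance

-- ===== CLAIM (what is proved, stated in full; the proofs are below) =====
def Claim_equal_repartir_uniformemente_py : Prop := ∀ (total : Int) (niveles : List Int), Dom_repartir_uniformemente_py total niveles → Spec_repartir_uniformemente_py total niveles (repartir_uniformemente_py total niveles)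

-- ===== LEMMAS AND PROOFS =====

-- A's loop body, rewritten as filter-then-map via induction on the list.
theorem pv_foldA (l : List (Int × Int)) (base resto : Int) :
    l.foldl (fun acc p =>
        let cantidad := base + (if p.1 < resto then (1 : Int) else 0)
        if cantidad > 0 then acc ++ [(p.2, cantidad)] else acc) []
      = (l.filter (fun p => decide (0 < base + (if p.1 < resto then (1 : Int) else 0)))).map
          (fun p => (p.2, base + (if p.1 < resto then (1 : Int) else 0))) := by
  induction l using List.reverseRecOn with
  | nil => simp
  | append_singleton xs x ih =>
      simp only [List.foldl_append, List.foldl_cons, List.foldl_nil, ih,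
        List.filter_append, List.map_append]
      by_cases h : 0 < base + (if x.1 < resto then (1 : Int) else 0) <;> simp [h]

-- Core invariant: from global index k with restante = p*base + max(resto-k,0),
-- B's greedy recursion produces exactly A's filtered enumeration of the suffix.
theorem pv_go_eq (xs : List Int) : ∀ (k base resto : Int),
    0 ≤ base → 0 ≤ resto → resto ≤ k + xs.length → 0 ≤ k →
    pvAltGo ((xs.length : Int) * base + max (resto - k) 0) (xs.length : Int) xs
      = ((PySem.List.enumerate xs k).filter
          (fun p => decide (0 < base + (if p.1 < resto then (1 : Int) else 0)))).map
          (fun p => (p.2, base + (if p.1 < resto then (1 : Int) else 0))) := by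
  induction xs with
  | nil => intro k base resto _ _ _ _; simp [pvAltGo, PySem.List.enumerate_nil]
  | cons x xs ih =>
      intro k base resto hb hr hrk hk
      have hp : (0 : Int) < ((x :: xs).length : Int) := by
        exact_mod_cast Nat.succ_pos xs.length
      set p : Int := ((x :: xs).length : Int) with hp_def
      have hpxs : p = (xs.length : Int) + 1 := by simp [hp_def]
      set m : Int := max (resto - k) 0 with hm_def
      have hm0 : 0 ≤ m := le_max_right _ _
      have hmp : m ≤ p := by
        have : resto - k ≤ p := by simp [hp_def]; omega
        omega
      rw [pvAltGo, PySem.List.enumerate_cons]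
      by_cases hstop : p * base + m ≤ 0
      · -- restante ≤ 0 forces base = 0 and m = 0: nothing left, A filters everything out
        have hb0 : base = 0 := by nlinarith
        have hm0' : m = 0 := by nlinarith
        have hkr : resto ≤ k := by
          have := le_max_left (resto - k) 0
          omega
        rw [if_pos hstop]
        have hfil : ((PySem.List.enumerate (x :: xs) k).filter
            (fun q => decide (0 < base + (if q.1 < resto then (1 : Int) else 0)))) = [] := by
          apply List.filter_eq_nil_iff.mpr
          intro q hq
          obtain ⟨j, hj, rfl⟩ := (PySem.List.mem_enumerate_iff _ _ _).mp hq
          have : ¬ (k + (j : Int) < resto) := by omega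
          simp [hb0, this]
        rw [PySem.List.enumerate_cons] at hfil
        rw [hfil]; simp
      · push_neg at hstop
        rw [if_neg (by omega)]
        -- the greedy share is base + (1 if k < resto else 0)
        have hcant : -(PySem.Int.floordiv (-(p * base + m)) p)
            = base + (if m > 0 then (1 : Int) else 0) := by
          rw [PySem.Int.neg_floordiv_neg_eq_iff_of_pos hp]
          by_cases h : m > 0 <;> simp [h] <;> constructor <;> nlinarith
        have hcond : (m > 0) ↔ (k < resto) := by
          constructor <;> intro h <;> omega
        -- new remainder matches the invariant for index k+1
        have hnext : p * base + m - (base + (if k < resto then (1 : Int) else 0))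
            = (xs.length : Int) * base + max (resto - (k + 1)) 0 := by
          have hmax : max (resto - (k + 1)) 0 = m - (if k < resto then (1 : Int) else 0) := by
            by_cases h : k < resto <;> simp [h] <;> omega
          rw [hmax, hpxs]; ring
        have hpm1 : p - 1 = (xs.length : Int) := by omega
        have hkeep : (0 : Int) < base + (if k < resto then (1 : Int) else 0) := by
          by_cases h : k < resto
          · simp [h]; omega
          · have : m = 0 := by omega
            simp [h]; nlinarith
        simp only [hcant, hcond, hpm1, List.filter_cons]
        rw [hnext, ih (k + 1) base resto hb hr (by omega) (by omega),
          if_pos (decide_eq_true hkeep)]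
        simp only [List.map_cons]

-- ===== VERDICT (by name: the statement is the Claim_ definition above) =====
theorem repartir_uniformemente_py_spec : Claim_equal_repartir_uniformemente_py := by
  intro total niveles _
  unfold Spec_repartir_uniformemente_py repartir_uniformemente_py repartir_uniformemente_py_alt
  by_cases hnil : niveles = [] ∨ total ≤ 0
  · rcases hnil with h | h
    · simp [h, pvAltGo]
    · rcases niveles with _ | ⟨x, xs⟩
      · simp [pvAltGo]
      · simp only [if_pos (Or.inr h)]
        rw [pvAltGo, if_pos h]
  · push_neg at hnil
    obtain ⟨hne, hpos⟩ := hnil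
    have hn : 0 < (niveles.length : Int) := by
      have := List.length_pos_iff.mpr hne; exact_mod_cast this
    have h0 : ¬ (niveles = [] ∨ total ≤ 0) := by push_neg; exact ⟨hne, by omega⟩
    simp only [h0, if_false]
    rw [pv_foldA]
    set n : Int := (niveles.length : Int) with hn_def
    set base := PySem.Int.floordiv total n with hbase
    set resto := PySem.Int.mod total n with hresto
    have hident := PySem.Int.floordiv_mul_add_mod total n
    rw [← hbase, ← hresto] at hident
    have hr0 : 0 ≤ resto := PySem.Int.mod_nonneg total hn
    have hrn : resto < n := PySem.Int.mod_lt total hn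
    have hb0 : 0 ≤ base := by
      rw [hbase, PySem.Int.le_floordiv_iff_mul_le hn]; omega
    have hini : total = n * base + max (resto - 0) 0 := by
      rw [max_eq_left (by omega)]
      have hc : n * base = base * n := mul_comm n base
      linarith [hident]
    rw [hini, hn_def]
    exact (pv_go_eq niveles 0 base resto hb0 hr0 (by omega) (by omega)).symm
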